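-- pv_equiv track=rewrite | github.com/BrMaro/CompletedCodewarsChallenges | Python/Special Multiples.py | get_product_of_n_consecutive_primes
-- ===== SOURCE A (Python) =====
-- def isprime(num):
--     for i in range(2, num):
--         if num % i == 0:
--             return False
--     return True
--
-- def get_product_of_n_consecutive_primes(n):
--     primelist = [2]
--     product = 2
--     number = 3
--     while len(primelist) < n:
--         if isprime(number):
--             primelist.append(number)
--             product *= number
--         number += 1
--     return product
-- ===== SOURCE B (Python) =====
-- def _is_prime_sqrt(c):
--     if c % 2 == 0:
--         return c == 2
--     d = 3
--     while d * d <= c: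
--         if c % d == 0:
--             return False
--         d += 2
--     return True
--
-- def get_product_of_n_consecutive_primes(n):
--     remaining = n - 1
--     product = 2
--     c = 3
--     while remaining > 0:
--         if _is_prime_sqrt(c):
--             remaining -= 1
--             product *= c
--         c += 1
--     return product
-- ===== Notes on version B (the rewrite author's own statement) =====
-- stated objective: faster
-- what changed: B keeps no prime list at all: it counts down the remaining primes to find while sweeping candidates, and replaces A's range(2,num) scan with a parity check plus trial division by odd divisors only up to the square root.
import Mathlib
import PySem

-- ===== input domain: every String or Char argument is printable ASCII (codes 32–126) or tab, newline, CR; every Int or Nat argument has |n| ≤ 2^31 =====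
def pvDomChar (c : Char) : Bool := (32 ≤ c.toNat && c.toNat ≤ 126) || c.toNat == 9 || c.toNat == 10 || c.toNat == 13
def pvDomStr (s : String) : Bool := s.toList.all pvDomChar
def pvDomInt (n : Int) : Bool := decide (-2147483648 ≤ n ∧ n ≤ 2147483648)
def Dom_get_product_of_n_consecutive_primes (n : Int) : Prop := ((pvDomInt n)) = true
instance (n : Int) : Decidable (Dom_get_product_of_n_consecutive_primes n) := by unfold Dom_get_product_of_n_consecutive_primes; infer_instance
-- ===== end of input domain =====

-- B drops A's prime list entirely: a count-down of the primes still needed replaces the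
-- list, and the primality test trial-divides by odd divisors up to the square root
-- instead of scanning all of range(2, num): asymptotically faster.

-- ===== PORT A =====
-- early-return loop `for i in range(2, num)` of isprime
def isprimeGo (num : Int) : List Int → Bool
  | [] => true
  | i :: rest => if PySem.Int.mod num i == 0 then false else isprimeGo num rest

def isprime (num : Int) : Bool := isprimeGo num (PySem.List.pyRange 2 num 1)

-- the `while len(primelist) < n` loop; fuel 2^n bounds the candidate sweep (p_n ≤ 2^n),
-- the loop itself stops exactly when the Python while-condition fails
def loopA : Nat → List Int → Int → Int → Int → Int
  | 0, _, product, _, _ => product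
  | fuel+1, primelist, product, number, n =>
    if (primelist.length : Int) < n then
      if isprime number then
        loopA fuel (primelist ++ [number]) (product * number) (number + 1) n
      else loopA fuel primelist product (number + 1) n
    else product

def get_product_of_n_consecutive_primes (n : Int) : Int :=
  loopA (2 ^ n.toNat) [2] 2 3 n

-- ===== PORT B =====
-- inner `while d * d <= c: if c % d == 0: return False; d += 2` of _is_prime_sqrt
def sqrtTrial (c : Int) (d : Int) : Bool :=
  if h : d * d ≤ c then
    if PySem.Int.mod c d == 0 then false
    else sqrtTrial c (d + 2)
  else true
termination_by (c + 2 - d).toNat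
decreasing_by
  have hd : d ≤ c + 1 := by nlinarith [sq_nonneg d]
  omega

def isPrimeSqrt (c : Int) : Bool :=
  if PySem.Int.mod c 2 == 0 then c == 2
  else sqrtTrial c 3

-- the `while remaining > 0` loop of B; same fuel bound as A's sweep
def loopB : Nat → Int → Int → Int → Int
  | 0, _, product, _ => product
  | fuel+1, remaining, product, c =>
    if remaining ≤ 0 then product
    else if isPrimeSqrt c then loopB fuel (remaining - 1) (product * c) (c + 1)
    else loopB fuel remaining product (c + 1)

def get_product_of_n_consecutive_primes_alt (n : Int) : Int :=
  loopB (2 ^ n.toNat) (n - 1) 2 3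

-- ===== PRECONDITION & SPEC =====
def Spec_get_product_of_n_consecutive_primes (n : Int) (out : Int) : Prop := out = get_product_of_n_consecutive_primes_alt n
instance (n : Int) (out : Int) : Decidable (Spec_get_product_of_n_consecutive_primes n out) := by unfold Spec_get_product_of_n_consecutive_primes; infer_instance

-- ===== CLAIM (what is proved, stated in full; the proofs are below) =====
def Claim_equal_get_product_of_n_consecutive_primes : Prop := ∀ (n : Int), Dom_get_product_of_n_consecutive_primes n → Spec_get_product_of_n_consecutive_primes n (get_product_of_n_consecutive_primes n)

-- ===== LEMMAS AND PROOFS =====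

theorem isprimeGo_true_iff (num : Int) (l : List Int) :
    isprimeGo num l = true ↔ ∀ i ∈ l, ¬ i ∣ num := by
  induction l with
  | nil => simp [isprimeGo]
  | cons i rest ih =>
    simp only [isprimeGo, List.mem_cons]
    split_ifs with h
    · simp only [beq_iff_eq, PySem.Int.mod_eq_zero_iff_dvd] at h
      constructor
      · intro h'; cases h'
      · intro h'; exact absurd h (h' i (Or.inl rfl))
    · simp only [beq_iff_eq, PySem.Int.mod_eq_zero_iff_dvd] at h
      rw [ih]
      constructor
      · rintro h' i' (rfl | hmem); exact h; exact h' i' hmem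
      · intro h' i' hmem; exact h' i' (Or.inr hmem)

theorem isprime_true_iff (c : Int) :
    isprime c = true ↔ ∀ i, 2 ≤ i → i < c → ¬ i ∣ c := by
  rw [isprime, isprimeGo_true_iff]
  constructor
  · intro h i h2 hlt
    exact h i (by rw [PySem.List.mem_pyRange_one]; exact ⟨h2, hlt⟩)
  · intro h i hmem
    rw [PySem.List.mem_pyRange_one] at hmem
    exact h i hmem.1 hmem.2

-- isprime restated through Nat.Prime (all values ≥ 2)
theorem isprime_iff_prime (c : Int) (hc : 2 ≤ c) :
    isprime c = true ↔ Nat.Prime c.toNat := by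
  rw [isprime_true_iff, Nat.prime_def_lt']
  constructor
  · intro h
    refine ⟨by omega, ?_⟩
    intro m h2 hlt hdvd
    refine h (m : Int) (by exact_mod_cast h2) (by omega) ?_
    have : (m : Int) ∣ (c.toNat : Int) := Int.natCast_dvd_natCast.mpr hdvd
    rwa [Int.toNat_of_nonneg (by omega)] at this
  · rintro ⟨-, h⟩ i h2 hlt hdvd
    refine h i.toNat (by omega) (by omega) ?_
    have : i.toNat ∣ c.toNat := by
      rw [← Int.natCast_dvd_natCast, Int.toNat_of_nonneg (by omega),
        Int.toNat_of_nonneg (by omega)]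
      exact hdvd
    exact this

-- B's square-root trial loop returns true when no tested divisor exists
theorem sqrtTrial_of_no_dvd (c : Int) (d : Int)
    (h : ∀ e, d ≤ e → e * e ≤ c → ¬ e ∣ c) : sqrtTrial c d = true := by
  rw [sqrtTrial]
  split_ifs with h1 h2
  · exact absurd (PySem.Int.mod_eq_zero_iff_dvd c d |>.mp (by simpa using h2))
      (h d le_rfl h1)
  · exact sqrtTrial_of_no_dvd c (d + 2) (fun e he => h e (by omega))
  · rfl
termination_by (c + 2 - d).toNat
decreasing_by
  have hd : d ≤ c + 1 := by nlinarith [sq_nonneg d]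
  omega

-- …and false when an odd divisor m with m*m ≤ c lies ahead and nothing before it divides c
theorem sqrtTrial_of_dvd (c : Int) (m : Int) (hmodd : Odd m)
    (hdvd : m ∣ c) (hsq : m * m ≤ c)
    (d : Int) (hdodd : Odd d) (hd1 : 1 ≤ d) (hdm : d ≤ m)
    (hmin : ∀ e, d ≤ e → e < m → ¬ e ∣ c) : sqrtTrial c d = false := by
  rw [sqrtTrial]
  have hsqd : d * d ≤ c := by nlinarith
  rw [dif_pos hsqd]
  rcases eq_or_lt_of_le hdm with rfl | hlt
  · rw [if_pos]
    simp [PySem.Int.mod_eq_zero_iff_dvd, hdvd]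
  · have hne : d + 2 ≤ m := by
      rcases hmodd with ⟨a, ha⟩; rcases hdodd with ⟨b, hb⟩; omega
    rw [if_neg]
    · exact sqrtTrial_of_dvd c m hmodd hdvd hsq (d + 2) (by
        rcases hdodd with ⟨b, hb⟩; exact ⟨b + 1, by omega⟩) (by omega) hne
        (fun e he => hmin e (by omega))
    · simp only [beq_iff_eq, PySem.Int.mod_eq_zero_iff_dvd]
      exact hmin d le_rfl hlt
termination_by (c + 2 - d).toNat
decreasing_by
  have hd : d ≤ c + 1 := by nlinarith [sq_nonneg d]
  omega

-- the heart: for every candidate c ≥ 3 the two primality tests agree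
theorem isPrimeSqrt_eq_isprime (c : Int) (hc : 3 ≤ c) :
    isPrimeSqrt c = isprime c := by
  rw [isPrimeSqrt]
  by_cases h2 : (2 : Int) ∣ c
  · -- even c ≥ 4: both false
    have hfalse : isprime c = false := by
      rw [← Bool.not_eq_true, isprime_true_iff]
      push_neg
      exact ⟨2, by omega, by omega, h2⟩
    rw [if_pos (by simp [h2]), hfalse]
    simp only [beq_eq_false_iff_ne]
    omega
  · rw [if_neg (by simp [h2])]
    cases hp : isprime c with
    | true =>
      exact sqrtTrial_of_no_dvd c 3 (fun e he hsq =>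
        (isprime_true_iff c).mp hp e (by omega) (by nlinarith))
    | false =>
      have hnp : ¬ Nat.Prime c.toNat := fun hpr =>
        by rw [(isprime_iff_prime c (by omega)).mpr hpr] at hp; cases hp
      set m : Nat := c.toNat.minFac with hm
      have hmp : Nat.Prime m := Nat.minFac_prime (by omega)
      have hmdvd : m ∣ c.toNat := Nat.minFac_dvd _
      have hmdvdInt : (m : Int) ∣ c := by
        have := Int.natCast_dvd_natCast.mpr hmdvd
        rwa [Int.toNat_of_nonneg (by omega)] at this
      have hm2 : 2 ≤ m := hmp.two_le
      have hmne2 : m ≠ 2 := fun h => h2 (by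
        have h' := hmdvdInt; rw [h] at h'; exact_mod_cast h')
      have hmodd : Odd (m : Int) := by
        rcases Nat.Prime.eq_two_or_odd' hmp with h | h
        · exact absurd h hmne2
        · exact_mod_cast h
      have hsqN : m * m ≤ c.toNat := by
        have := Nat.minFac_sq_le_self (by omega) hnp
        simpa [pow_two] using this
      have hsq : (m : Int) * m ≤ c := by
        have h' := Int.ofNat_le.mpr hsqN
        rwa [Int.natCast_mul, Int.toNat_of_nonneg (show (0:Int) ≤ c by omega)] at h'
      refine sqrtTrial_of_dvd c (m : Int) hmodd hmdvdInt hsq 3 ⟨1, by ring⟩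
        (by omega) (by exact_mod_cast (show 3 ≤ m by omega)) ?_
      intro e he hem hedvd
      have : e.toNat ∣ c.toNat := by
        rw [← Int.natCast_dvd_natCast, Int.toNat_of_nonneg (by omega),
          Int.toNat_of_nonneg (by omega)]
        exact hedvd
      have := Nat.minFac_le_of_dvd (by omega) this
      omega

-- lockstep: A's list-carrying loop equals B's count-down loop; only the list's
-- length matters to A, and n - length is B's remaining count
theorem loop_eq (fuel : Nat) :
    ∀ (pl : List Int) (product c n : Int), 3 ≤ c →
      loopA fuel pl product c n = loopB fuel (n - pl.length) product c := by
  induction fuel with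
  | zero => intros; rfl
  | succ fuel ih =>
    intro pl product c n h3
    simp only [loopA, loopB]
    by_cases hlt : (pl.length : Int) < n
    · rw [if_pos hlt, if_neg (show ¬ n - (pl.length : Int) ≤ 0 by omega),
        isPrimeSqrt_eq_isprime c h3]
      by_cases hp : isprime c = true
      · rw [if_pos hp, if_pos hp, ih (pl ++ [c]) (product * c) (c + 1) n (by omega)]
        congr 1
        simp only [List.length_append, List.length_cons, List.length_nil]
        push_cast
        omega
      · rw [if_neg hp, if_neg hp]
        exact ih pl product (c + 1) n (by omega)
    · rw [if_neg hlt, if_pos (by omega)]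

-- ===== VERDICT (by name: the statement is the Claim_ definition above) =====
theorem get_product_of_n_consecutive_primes_spec : Claim_equal_get_product_of_n_consecutive_primes := by
  intro n _
  show get_product_of_n_consecutive_primes n = get_product_of_n_consecutive_primes_alt n
  have := loop_eq (2 ^ n.toNat) [2] 2 3 n (by omega)
  simpa [get_product_of_n_consecutive_primes, get_product_of_n_consecutive_primes_alt] using this
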